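-- pv_equiv track=rewrite | github.com/cs-99/federated_execution_prototype | utility.py | are_lists_equal_with_rotation
-- ===== SOURCE A (Python) =====
-- from collections import deque
-- from typing import Any, List
--
-- def are_lists_equal_with_rotation(list1 : List, list2 : List) -> bool:
--     if len(list1) != len(list2):
--         return False
--     list1_deque = deque(list1)
--     for _ in range(len(list1)):
--         if list(list1_deque) == list2:
--             return True
--         list1_deque.rotate(1)
--     return False
-- ===== SOURCE B (Python) =====
-- def are_lists_equal_with_rotation(list1, list2):
--     n = len(list1)
--     if n != len(list2):
--         return False
--     doubled = list1 + list1
--     return any(doubled[i:i + n] == list2 for i in range(n))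
-- ===== Notes on version B (the rewrite author's own statement) =====
-- stated objective: alternative
-- what changed: Replaces the deque rotate-and-compare loop (rebuilding and comparing a full rotated list each step) by a sliding-window scan over the concatenation list1+list1, checking whether list2 occurs as a length-n slice.
import Mathlib
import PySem

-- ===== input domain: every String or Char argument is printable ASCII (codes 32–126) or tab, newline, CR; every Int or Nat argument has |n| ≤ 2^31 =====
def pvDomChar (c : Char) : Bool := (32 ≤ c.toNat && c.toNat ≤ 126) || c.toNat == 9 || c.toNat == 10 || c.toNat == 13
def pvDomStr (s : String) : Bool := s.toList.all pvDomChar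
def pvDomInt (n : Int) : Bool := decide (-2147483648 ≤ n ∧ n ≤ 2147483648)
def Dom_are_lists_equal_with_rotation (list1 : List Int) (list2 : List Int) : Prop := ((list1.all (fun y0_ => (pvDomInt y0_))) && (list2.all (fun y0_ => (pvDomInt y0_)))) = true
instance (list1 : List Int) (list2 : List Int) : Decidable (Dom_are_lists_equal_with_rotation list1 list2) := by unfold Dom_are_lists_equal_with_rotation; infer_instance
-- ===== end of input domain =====

-- B replaces A's deque rotate-and-compare loop by a sliding-window scan over list1 ++ list1 (alternative decomposition, same worst-case cost).

-- ===== PORT A =====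
-- deque.rotate(1) moves the last element to the front (exact, also on [])
def pyRotR1 (l : List Int) : List Int := l.drop (l.length - 1) ++ l.take (l.length - 1)

-- the 'for _ in range(len(list1))' loop over the mutating deque
def rotLoopA (list2 : List Int) (dq : List Int) : Nat → Bool
  | 0 => false
  | k + 1 => if dq == list2 then true else rotLoopA list2 (pyRotR1 dq) k

def are_lists_equal_with_rotation (list1 : List Int) (list2 : List Int) : Bool :=
  if list1.length ≠ list2.length then false
  else rotLoopA list2 list1 list1.length

-- ===== PORT B =====
def are_lists_equal_with_rotation_alt (list1 : List Int) (list2 : List Int) : Bool :=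
  let n : Int := list1.length
  if n ≠ (list2.length : Int) then false
  else
    let doubled := list1 ++ list1
    (PySem.List.pyRange 0 n 1).any (fun i => PySem.List.slice doubled (some i) (some (i + n)) == list2)

-- ===== PRECONDITION & SPEC =====
def Spec_are_lists_equal_with_rotation (list1 : List Int) (list2 : List Int) (out : Bool) : Prop := out = are_lists_equal_with_rotation_alt list1 list2
instance (list1 : List Int) (list2 : List Int) (out : Bool) : Decidable (Spec_are_lists_equal_with_rotation list1 list2 out) := by unfold Spec_are_lists_equal_with_rotation; infer_instance

-- ===== CLAIM (what is proved, stated in full; the proofs are below) =====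
def Claim_equal_are_lists_equal_with_rotation : Prop := ∀ (list1 : List Int) (list2 : List Int), Dom_are_lists_equal_with_rotation list1 list2 → Spec_are_lists_equal_with_rotation list1 list2 (are_lists_equal_with_rotation list1 list2)

-- ===== LEMMAS AND PROOFS =====

-- left rotation by i: the value both loops' comparands reduce to
def rotL (i : Nat) (l : List Int) : List Int := l.drop i ++ l.take i

theorem rotL_zero (l : List Int) : rotL 0 l = l := by simp [rotL]

theorem rotL_length (l : List Int) : rotL l.length l = l := by simp [rotL]

theorem pyRotR1_snoc (ys : List Int) (a : Int) : pyRotR1 (ys ++ [a]) = a :: ys := by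
  unfold pyRotR1
  have h : (ys ++ [a]).length - 1 = ys.length := by simp
  rw [h, List.drop_left, List.take_left]; rfl

-- rotating right one step from rotL (m+1) gives rotL m
theorem pyRotR1_rotL (l : List Int) (m : Nat) (h : m + 1 ≤ l.length) :
    pyRotR1 (rotL (m + 1) l) = rotL m l := by
  have hm : m < l.length := by omega
  have h1 : rotL (m + 1) l = (l.drop (m + 1) ++ l.take m) ++ [l[m]] := by
    unfold rotL
    have : l.take (m + 1) = l.take m ++ [l[m]] := by
      rw [List.take_add_one, List.getElem?_eq_getElem hm]; simp
    rw [this]; simp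
  rw [h1, pyRotR1_snoc]
  unfold rotL
  rw [List.drop_eq_getElem_cons hm, List.cons_append]

-- characterisation of A's loop: starting from rotL m l with fuel m it tests rotL m, ..., rotL 1
theorem rotLoopA_iff (l l2 : List Int) (m : Nat) (hm : m ≤ l.length) :
    rotLoopA l2 (rotL m l) m = true ↔ ∃ i, 1 ≤ i ∧ i ≤ m ∧ rotL i l = l2 := by
  induction m with
  | zero => simp [rotLoopA]
  | succ m ih =>
    unfold rotLoopA
    rw [pyRotR1_rotL l m hm]
    cases hbeq : (rotL (m + 1) l == l2) with
    | true =>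
      simp only [if_true]
      constructor
      · intro _; exact ⟨m + 1, by omega, by omega, eq_of_beq hbeq⟩
      · intro _; trivial
    | false =>
      simp only [Bool.false_eq_true, if_false]
      rw [ih (by omega)]
      constructor
      · rintro ⟨i, h1, h2, h3⟩; exact ⟨i, h1, by omega, h3⟩
      · rintro ⟨i, h1, h2, h3⟩
        refine ⟨i, h1, ?_, h3⟩
        rcases Nat.lt_or_ge i (m + 1) with hlt | hge
        · omega
        · exfalso
          have hi : i = m + 1 := by omega
          rw [hi] at h3
          have : (rotL (m + 1) l == l2) = true := by simp [h3]
          rw [hbeq] at this; exact absurd this (by simp)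

-- the slice of the doubled list is a left rotation
theorem slice_doubled (l : List Int) (k : Nat) (hk : k ≤ l.length) :
    PySem.List.slice (l ++ l) (some (k : Int)) (some ((k : Int) + (l.length : Int))) =
      rotL k l := by
  rw [PySem.List.slice_natCast_add]
  unfold rotL
  rw [List.drop_append_of_le_length hk, List.take_append]
  have h1 : (l.drop k).length = l.length - k := by simp
  rw [List.take_of_length_le (by omega)]
  congr 2
  omega

theorem alt_iff (l l2 : List Int) (hl : l.length = l2.length) :
    are_lists_equal_with_rotation_alt l l2 = true ↔ ∃ k, k < l.length ∧ rotL k l = l2 := by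
  unfold are_lists_equal_with_rotation_alt
  rw [if_neg (by simp [hl])]
  rw [PySem.List.pyRange_one]
  simp only [Int.sub_zero, Int.toNat_natCast, List.any_map, List.any_eq_true, List.mem_range,
    Function.comp, Int.zero_add, beq_iff_eq]
  constructor
  · rintro ⟨k, hk, hbeq⟩
    exact ⟨k, hk, by rw [← slice_doubled l k (by omega)]; exact hbeq⟩
  · rintro ⟨k, hk, heq⟩
    exact ⟨k, hk, by rw [slice_doubled l k (by omega)]; exact heq⟩

theorem a_iff (l l2 : List Int) (hl : l.length = l2.length) :
    are_lists_equal_with_rotation l l2 = true ↔ ∃ i, 1 ≤ i ∧ i ≤ l.length ∧ rotL i l = l2 := by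
  unfold are_lists_equal_with_rotation
  rw [if_neg (by simp [hl])]
  have h := rotLoopA_iff l l2 l.length (le_refl _)
  rw [rotL_length] at h
  exact h

-- ===== VERDICT (by name: the statement is the Claim_ definition above) =====
theorem are_lists_equal_with_rotation_spec : Claim_equal_are_lists_equal_with_rotation := by
  intro l l2 _
  unfold Spec_are_lists_equal_with_rotation
  by_cases hl : l.length = l2.length
  · rw [Bool.eq_iff_iff, a_iff l l2 hl, alt_iff l l2 hl]
    constructor
    · rintro ⟨i, h1, h2, h3⟩
      rcases Nat.lt_or_ge i l.length with hlt | hge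
      · exact ⟨i, hlt, h3⟩
      · have hi : i = l.length := by omega
        rw [hi, rotL_length] at h3
        exact ⟨0, by omega, by rw [rotL_zero]; exact h3⟩
    · rintro ⟨k, hk, h3⟩
      rcases Nat.eq_zero_or_pos k with h0 | hpos
      · subst h0
        rw [rotL_zero] at h3
        exact ⟨l.length, by omega, le_refl _, by rw [rotL_length]; exact h3⟩
      · exact ⟨k, hpos, by omega, h3⟩
  · unfold are_lists_equal_with_rotation are_lists_equal_with_rotation_alt
    rw [if_pos hl, if_pos (by simpa using hl)]
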